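-- pv_equiv track=rewrite | github.com/GitSid-glitch/Competitive_Programming | C_New_Game.py | takecards
-- ===== SOURCE A (Python) =====
-- def takecards(n, k, c):
--     c_count = {}
--     for i in c:
--         if i in c_count:
--             c_count[i] += 1
--         else:
--             c_count[i] = 1
--
--     u = sorted(c_count.keys())
--
--     m = 0
--     cg = 0
--     left = 0
--
--     for j in range(len(u)):
--         if j > 0 and u[j] > u[j - 1] + 1:
--             while left < j:
--                 cg -= c_count[u[left]]
--                 left += 1
--
--         cg += c_count[u[j]]
--
--         while j - left + 1 > k:
--             cg -= c_count[u[left]]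
--             left += 1
--
--         m = max(m, cg)
--
--     return m
-- ===== SOURCE B (Python) =====
-- def takecards(n, k, c):
--     # Prefix-sum formulation: build counts and the sorted unique values once,
--     # then for each position use a closed-form window bound and a prefix-sum
--     # difference instead of a running left-pointer window.
--     if k <= 0:
--         return 0
--     cnt = {}
--     for v in c:
--         cnt[v] = cnt.get(v, 0) + 1
--     u = sorted(cnt)
--     pre = [0]
--     for v in u:
--         pre.append(pre[-1] + cnt[v])
--     best = 0
--     start = 0
--     for j in range(len(u)):
--         if j > 0 and u[j] != u[j - 1] + 1:
--             start = j
--         lo = max(start, j + 1 - k)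
--         if lo <= j:
--             best = max(best, pre[j + 1] - pre[lo])
--     return best
-- ===== Notes on version B (the rewrite author's own statement) =====
-- stated objective: alternative
-- what changed: A's fused left-pointer sliding window with two inner drain loops and a running window sum is replaced by a prefix-sum array over the sorted unique values plus a closed-form window lower bound max(run_start, j+1-k) per index, so each window total is one subtraction and there are no inner while loops.
import Mathlib
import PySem

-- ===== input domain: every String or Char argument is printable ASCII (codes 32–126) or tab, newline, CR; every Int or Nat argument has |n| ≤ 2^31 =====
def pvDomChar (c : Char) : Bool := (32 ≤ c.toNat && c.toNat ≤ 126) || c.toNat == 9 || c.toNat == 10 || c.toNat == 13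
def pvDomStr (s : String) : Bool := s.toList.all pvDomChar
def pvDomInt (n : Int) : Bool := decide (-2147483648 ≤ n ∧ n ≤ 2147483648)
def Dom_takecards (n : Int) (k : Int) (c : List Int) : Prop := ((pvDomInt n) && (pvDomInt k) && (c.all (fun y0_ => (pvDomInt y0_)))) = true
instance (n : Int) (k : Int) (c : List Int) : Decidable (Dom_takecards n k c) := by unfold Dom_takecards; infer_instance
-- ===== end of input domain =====

-- B replaces A's fused left-pointer sliding window (two inner drain loops and a
-- running window sum) by a prefix-sum array over the sorted unique values and a
-- closed-form per-index window bound; same asymptotic cost (alternative).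

-- ===== PORT A =====
-- inner `while left < j` drain after a gap: cg -= c_count[u[left]]; left += 1
-- (c_count[u[left]] / u[left] ported with getD/pyGetD defaults: inside Pre_ every
-- access is in range, exactly where the Python does not raise)
def pvDrainGap (cnt : PySem.Dict Int Int) (u : List Int) (j : Int) (cg left : Int) : Int × Int :=
  if left < j then
    pvDrainGap cnt u j (cg - cnt.getD (PySem.List.pyGetD u left 0) 0) (left + 1)
  else (cg, left)
  termination_by (j - left).toNat
  decreasing_by omega

-- inner `while j - left + 1 > k` drain (window wider than k)
def pvDrainK (cnt : PySem.Dict Int Int) (u : List Int) (j k : Int) (cg left : Int) : Int × Int :=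
  if j - left + 1 > k then
    pvDrainK cnt u j k (cg - cnt.getD (PySem.List.pyGetD u left 0) 0) (left + 1)
  else (cg, left)
  termination_by (j + 1 - k - left).toNat
  decreasing_by omega

-- the body of A's `for j in range(len(u))` loop; state = (m, cg, left)
def pvStepA (cnt : PySem.Dict Int Int) (u : List Int) (k : Int)
    (s : Int × Int × Int) (j : Int) : Int × Int × Int :=
  let t :=
    if 0 < j ∧ PySem.List.pyGetD u j 0 > PySem.List.pyGetD u (j - 1) 0 + 1 then
      pvDrainGap cnt u j s.2.1 s.2.2
    else (s.2.1, s.2.2)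
  let cg := t.1 + cnt.getD (PySem.List.pyGetD u j 0) 0
  let t2 := pvDrainK cnt u j k cg t.2
  (max s.1 t2.1, t2.1, t2.2)

def takecards (n : Int) (k : Int) (c : List Int) : Int :=
  let c_count := c.foldl
    (fun d i => if d.contains i then d.modify i 0 (· + 1) else d.insert i 1)
    PySem.Dict.empty
  let u := PySem.List.sorted c_count.keys (fun x => x)
  ((PySem.List.pyRange 0 (u.length)).foldl (pvStepA c_count u k) (0, 0, 0)).1

-- ===== PORT B =====
-- `pre = [0]; for v in u: pre.append(pre[-1] + cnt[v])`
def pvBuildPre (cnt : PySem.Dict Int Int) (u : List Int) : List Int :=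
  u.foldl (fun pre v => pre ++ [PySem.List.pyGetD pre (-1) 0 + cnt.getD v 0]) [0]

-- the body of B's `for j in range(len(u))` loop; state = (best, start)
def pvStepB (u : List Int) (k : Int) (pre : List Int)
    (s : Int × Int) (j : Int) : Int × Int :=
  let start := if 0 < j ∧ PySem.List.pyGetD u j 0 ≠ PySem.List.pyGetD u (j - 1) 0 + 1 then j else s.2
  let lo := max start (j + 1 - k)
  let best :=
    if lo ≤ j then
      max s.1 (PySem.List.pyGetD pre (j + 1) 0 - PySem.List.pyGetD pre lo 0)
    else s.1
  (best, start)

def takecards_alt (n : Int) (k : Int) (c : List Int) : Int :=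
  if k ≤ 0 then 0
  else
    let cnt := c.foldl (fun d v => d.insert v (d.getD v 0 + 1)) PySem.Dict.empty
    let u := PySem.List.sorted cnt.keys (fun x => x)
    let pre := pvBuildPre cnt u
    ((PySem.List.pyRange 0 (u.length)).foldl (pvStepB u k pre) (0, 0)).1

-- ===== PRECONDITION & SPEC =====
-- Pre_ excludes exactly k < 0 with nonempty c: there A's shrink loop runs the left
-- pointer past the end of u and raises IndexError (A returns on everything else).
def Pre_takecards (n : Int) (k : Int) (c : List Int) : Prop := 0 ≤ k ∨ c = []
instance (n : Int) (k : Int) (c : List Int) : Decidable (Pre_takecards n k c) := by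
  unfold Pre_takecards; infer_instance

def pvWitness_takecards : Int × Int × List Int := (4, 2, [1, 2, 2, 4])

def Spec_takecards (n : Int) (k : Int) (c : List Int) (out : Int) : Prop := out = takecards_alt n k c
instance (n : Int) (k : Int) (c : List Int) (out : Int) : Decidable (Spec_takecards n k c out) := by unfold Spec_takecards; infer_instance

-- ===== CLAIM (what is proved, stated in full; the proofs are below) =====
def Claim_equal_takecards : Prop := ∀ (n : Int) (k : Int) (c : List Int), Dom_takecards n k c → Pre_takecards n k c → Spec_takecards n k c (takecards n k c)

-- ===== LEMMAS AND PROOFS =====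

def pvF (cnt : PySem.Dict Int Int) (u : List Int) (t : Nat) : Int :=
  cnt.getD (u.getD t 0) 0

def pvP (cnt : PySem.Dict Int Int) (u : List Int) (m : Nat) : Int :=
  ((List.range m).map (pvF cnt u)).sum

def pvStart (u : List Int) : Nat → Nat
  | 0 => 0
  | m + 1 => if u.getD (m + 1) 0 > u.getD m 0 + 1 then m + 1 else pvStart u m

def pvL (u : List Int) (k : Int) : Nat → Int
  | 0 => 0
  | m + 1 => max (pvStart u m : Int) ((m : Int) + 1 - k)

def pvM (cnt : PySem.Dict Int Int) (u : List Int) (k : Int) : Nat → Int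
  | 0 => 0
  | m + 1 => max (pvM cnt u k m) (pvP cnt u (m + 1) - pvP cnt u (pvL u k (m + 1)).toNat)

def pvS (u : List Int) : Nat → Int
  | 0 => 0
  | m + 1 => (pvStart u m : Int)

lemma pvP_succ (cnt : PySem.Dict Int Int) (u : List Int) (m : Nat) :
    pvP cnt u (m + 1) = pvP cnt u m + pvF cnt u m := by
  simp [pvP, List.range_succ]

lemma pvStart_le (u : List Int) (m : Nat) : pvStart u m ≤ m := by
  induction m with
  | zero => simp [pvStart]
  | succ m ih => simp only [pvStart]; split <;> omega

lemma pvL_nonneg (u : List Int) (k : Int) (m : Nat) : 0 ≤ pvL u k m := by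
  cases m with
  | zero => simp [pvL]
  | succ m => simp only [pvL]; positivity

lemma pvL_le (u : List Int) (k : Int) (hk : 0 ≤ k) (m : Nat) : pvL u k m ≤ (m : Int) := by
  cases m with
  | zero => simp [pvL]
  | succ m =>
    have := pvStart_le u m
    simp only [pvL]
    push_cast
    omega

lemma pvL_succ_nogap (u : List Int) (k : Int) (m : Nat)
    (h : ¬ (0 < (m : Int) ∧ u.getD m 0 > u.getD (m - 1) 0 + 1)) :
    pvL u k (m + 1) = max (pvL u k m) ((m : Int) + 1 - k) := by
  cases m with
  | zero => simp [pvL, pvStart]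
  | succ m =>
    have hgap : ¬ (u.getD (m + 1) 0 > u.getD m 0 + 1) := by
      intro hg
      exact h ⟨by positivity, hg⟩
    have hs := pvStart_le u m
    simp only [pvL, pvStart, if_neg hgap]
    push_cast
    omega

lemma drainGap_eq (cnt : PySem.Dict Int Int) (u : List Int) (j : Int) (cg left : Int)
    (h0 : 0 ≤ left) (h1 : left ≤ j) :
    pvDrainGap cnt u j cg left = (cg + pvP cnt u left.toNat - pvP cnt u j.toNat, j) := by
  obtain ⟨d, hd⟩ : ∃ d : Nat, (j - left).toNat = d := ⟨_, rfl⟩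
  induction d generalizing cg left with
  | zero =>
    have hj : left = j := by omega
    subst hj
    rw [pvDrainGap]
    simp
  | succ d ih =>
    have hlt : left < j := by omega
    rw [pvDrainGap, if_pos hlt,
      ih _ _ (by omega) (by omega) (by omega)]
    have hstep : pvP cnt u (left + 1).toNat = pvP cnt u left.toNat + pvF cnt u left.toNat := by
      have : (left + 1).toNat = left.toNat + 1 := by omega
      rw [this, pvP_succ]
    rw [PySem.List.pyGetD_of_nonneg u 0 h0]
    simp only [Prod.mk.injEq]
    refine ⟨?_, trivial⟩
    simp only [pvF] at hstep
    omega

lemma drainK_eq (cnt : PySem.Dict Int Int) (u : List Int) (j k : Int) (cg left : Int)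
    (h0 : 0 ≤ left) :
    pvDrainK cnt u j k cg left =
      (cg + pvP cnt u left.toNat - pvP cnt u (max left (j + 1 - k)).toNat, max left (j + 1 - k)) := by
  obtain ⟨d, hd⟩ : ∃ d : Nat, (j + 1 - k - left).toNat = d := ⟨_, rfl⟩
  induction d generalizing cg left with
  | zero =>
    have hle : ¬ (j - left + 1 > k) := by omega
    have hmax : max left (j + 1 - k) = left := by omega
    rw [pvDrainK, if_neg hle, hmax]
    simp
  | succ d ih =>
    have hlt : j - left + 1 > k := by omega
    have hmax : max (left + 1) (j + 1 - k) = max left (j + 1 - k) := by omega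
    rw [pvDrainK, if_pos hlt, ih _ _ (by omega) (by omega), hmax]
    have hstep : pvP cnt u (left + 1).toNat = pvP cnt u left.toNat + pvF cnt u left.toNat := by
      have : (left + 1).toNat = left.toNat + 1 := by omega
      rw [this, pvP_succ]
    rw [PySem.List.pyGetD_of_nonneg u 0 h0]
    simp only [Prod.mk.injEq]
    refine ⟨?_, trivial⟩
    simp only [pvF] at hstep
    omega

lemma A_loop (cnt : PySem.Dict Int Int) (u : List Int) (k : Int) (hk : 0 ≤ k) (m : Nat) :
    (PySem.List.pyRange 0 (m : Int)).foldl (pvStepA cnt u k) (0, 0, 0) =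
      (pvM cnt u k m, pvP cnt u m - pvP cnt u (pvL u k m).toNat, pvL u k m) := by
  induction m with
  | zero =>
    rw [Int.natCast_zero, PySem.List.pyRange_one_eq_nil le_rfl]
    simp [pvM, pvL, pvP]
  | succ m ih =>
    have hcast : ((m + 1 : Nat) : Int) = (m : Int) + 1 := by push_cast; ring
    rw [hcast, PySem.List.pyRange_one_succ_right (by positivity), List.foldl_append, ih]
    simp only [List.foldl_cons, List.foldl_nil]
    have hL0 := pvL_nonneg u k m
    have hLle := pvL_le u k hk m
    have hgetm : PySem.List.pyGetD u (m : Int) 0 = u.getD m 0 := PySem.List.pyGetD_natCast u m 0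
    by_cases hc : 0 < (m : Int) ∧ PySem.List.pyGetD u (m : Int) 0 > PySem.List.pyGetD u ((m : Int) - 1) 0 + 1
    · -- gap at m: m = m' + 1
      obtain ⟨m', rfl⟩ : ∃ m', m = m' + 1 := by
        cases m with
        | zero => exact absurd hc.1 (by simp)
        | succ m' => exact ⟨m', rfl⟩
      have hgetm' : PySem.List.pyGetD u ((m' + 1 : Nat) : Int) 0 = u.getD (m' + 1) 0 :=
        PySem.List.pyGetD_natCast u (m' + 1) 0
      have hgetm'' : PySem.List.pyGetD u (((m' + 1 : Nat) : Int) - 1) 0 = u.getD m' 0 := by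
        have : ((m' + 1 : Nat) : Int) - 1 = ((m' : Nat) : Int) := by push_cast; ring
        rw [this, PySem.List.pyGetD_natCast]
      have hstart : pvStart u (m' + 1) = m' + 1 := by
        have := hc.2
        rw [hgetm', hgetm''] at this
        simp only [pvStart, if_pos this]
      rw [pvStepA, if_pos hc,
        drainGap_eq cnt u _ _ _ hL0 hLle,
        drainK_eq cnt u _ _ _ _ (by positivity)]
      have hLsucc : pvL u k (m' + 1 + 1) = max ((m' + 1 : Nat) : Int) (((m' + 1 : Nat) : Int) + 1 - k) := by
        simp only [pvL, hstart]
      conv_rhs => rw [pvM]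
      simp only [Prod.mk.injEq, hgetm']
      have htn : ((m' + 1 : Nat) : Int).toNat = m' + 1 := by omega
      have hPsucc := pvP_succ cnt u (m' + 1)
      simp only [pvF] at hPsucc
      rw [← hLsucc]
      simp only [htn]
      refine ⟨?_, ?_, trivial⟩ <;> omega
    · -- no gap at m
      rw [pvStepA, if_neg hc, drainK_eq cnt u _ _ _ _ hL0]
      have hc' : ¬ (0 < (m : Int) ∧ u.getD m 0 > u.getD (m - 1) 0 + 1) := by
        cases m with
        | zero => simp
        | succ m' =>
          intro ⟨h1, h2⟩
          apply hc
          refine ⟨h1, ?_⟩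
          rw [hgetm]
          have : ((m' + 1 : Nat) : Int) - 1 = ((m' : Nat) : Int) := by push_cast; ring
          rw [this, PySem.List.pyGetD_natCast]
          convert h2 using 3
      have hLsucc := pvL_succ_nogap u k m hc'
      conv_rhs => rw [pvM]
      simp only [Prod.mk.injEq, hgetm]
      have hPsucc := pvP_succ cnt u m
      simp only [pvF] at hPsucc
      rw [← hLsucc]
      refine ⟨?_, ?_, rfl⟩ <;> omega

lemma pvM_zero_k (cnt : PySem.Dict Int Int) (u : List Int) (m : Nat) :
    pvM cnt u 0 m = 0 := by
  induction m with
  | zero => rfl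
  | succ m ih =>
    have hs := pvStart_le u m
    have hL : pvL u 0 (m + 1) = ((m + 1 : Nat) : Int) := by
      simp only [pvL]; omega
    have ht : ((m + 1 : Nat) : Int).toNat = m + 1 := by omega
    simp only [pvM, hL, ht, ih, sub_self, max_self]

lemma buildPre_take (cnt : PySem.Dict Int Int) (u : List Int) (m : Nat) (hm : m ≤ u.length) :
    (u.take m).foldl (fun pre v => pre ++ [PySem.List.pyGetD pre (-1) 0 + cnt.getD v 0]) [0]
      = (List.range (m + 1)).map (pvP cnt u) := by
  induction m with
  | zero => simp [pvP]
  | succ m ih =>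
    have hlt : m < u.length := by omega
    have htake : u.take (m + 1) = u.take m ++ [u.getD m 0] := by
      rw [List.take_add_one, List.getElem?_eq_getElem hlt, List.getD_eq_getElem u 0 hlt]
      rfl
    rw [htake, List.foldl_append, ih (by omega), List.foldl_cons, List.foldl_nil]
    have hsplit : (List.range (m + 1)).map (pvP cnt u)
        = (List.range m).map (pvP cnt u) ++ [pvP cnt u m] := by
      rw [List.range_succ, List.map_append, List.map_singleton]
    rw [hsplit, PySem.List.pyGetD_neg_one_append_singleton]
    rw [List.range_succ (n := m + 1), List.map_append, List.map_singleton, ← hsplit]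
    congr 1
    simp [pvP_succ, pvF]

lemma buildPre_eq (cnt : PySem.Dict Int Int) (u : List Int) :
    pvBuildPre cnt u = (List.range (u.length + 1)).map (pvP cnt u) := by
  have h := buildPre_take cnt u u.length le_rfl
  rw [List.take_length] at h
  rw [pvBuildPre]
  exact h

lemma B_loop (cnt : PySem.Dict Int Int) (u : List Int) (k : Int) (hk : 1 ≤ k)
    (hs : u.Pairwise (· < ·)) (m : Nat) (hm : m ≤ u.length) :
    (PySem.List.pyRange 0 (m : Int)).foldl
        (pvStepB u k ((List.range (u.length + 1)).map (pvP cnt u))) (0, 0) =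
      (pvM cnt u k m, pvS u m) := by
  induction m with
  | zero =>
    rw [Int.natCast_zero, PySem.List.pyRange_one_eq_nil le_rfl]
    simp [pvM, pvS]
  | succ m ih =>
    have hmlt : m < u.length := by omega
    have hcast : ((m + 1 : Nat) : Int) = (m : Int) + 1 := by push_cast; ring
    rw [hcast, PySem.List.pyRange_one_succ_right (by positivity), List.foldl_append,
      ih (by omega), List.foldl_cons, List.foldl_nil]
    -- the computed new start equals pvStart u m
    have hstart : (if 0 < (m : Int) ∧
          PySem.List.pyGetD u (m : Int) 0 ≠ PySem.List.pyGetD u ((m : Int) - 1) 0 + 1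
        then (m : Int) else pvS u m) = (pvStart u m : Int) := by
      cases m with
      | zero => simp [pvS, pvStart]
      | succ m' =>
        have hm'lt : m' < u.length := by omega
        have hg1 : PySem.List.pyGetD u ((m' + 1 : Nat) : Int) 0 = u.getD (m' + 1) 0 :=
          PySem.List.pyGetD_natCast u (m' + 1) 0
        have hg2 : PySem.List.pyGetD u (((m' + 1 : Nat) : Int) - 1) 0 = u.getD m' 0 := by
          have : ((m' + 1 : Nat) : Int) - 1 = ((m' : Nat) : Int) := by push_cast; ring
          rw [this, PySem.List.pyGetD_natCast]
        have hlt : u.getD m' 0 < u.getD (m' + 1) 0 := by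
          rw [List.getD_eq_getElem u 0 hm'lt, List.getD_eq_getElem u 0 hmlt]
          exact List.pairwise_iff_getElem.mp hs m' (m' + 1) hm'lt hmlt (by omega)
        have hiff : (0 < ((m' + 1 : Nat) : Int) ∧
              PySem.List.pyGetD u ((m' + 1 : Nat) : Int) 0 ≠ PySem.List.pyGetD u (((m' + 1 : Nat) : Int) - 1) 0 + 1)
            ↔ (u.getD (m' + 1) 0 > u.getD m' 0 + 1) := by
          rw [hg1, hg2]
          constructor
          · intro ⟨_, hne⟩; omega
          · intro hgt; exact ⟨by positivity, by omega⟩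
        by_cases hgap : u.getD (m' + 1) 0 > u.getD m' 0 + 1
        · rw [if_pos (hiff.mpr hgap)]
          simp only [pvStart, if_pos hgap]
        · rw [if_neg (fun hc => hgap (hiff.mp hc))]
          simp only [pvS, pvStart, if_neg hgap]
    rw [pvStepB, hstart]
    have hsle := pvStart_le u m
    have hLsucc : max ((pvStart u m : Nat) : Int) ((m : Int) + 1 - k) = pvL u k (m + 1) := by
      simp only [pvL]
    have hlo_le : pvL u k (m + 1) ≤ (m : Int) := by
      simp only [pvL]; omega
    have hlo_nonneg : (0 : Int) ≤ pvL u k (m + 1) := by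
      simp only [pvL]; positivity
    rw [hLsucc, if_pos hlo_le]
    have hpre1 : PySem.List.pyGetD ((List.range (u.length + 1)).map (pvP cnt u)) ((m : Int) + 1) 0
        = pvP cnt u (m + 1) := by
      rw [← hcast, PySem.List.pyGetD_natCast,
        PySem.List.getD_map_range (pvP cnt u) (u.length + 1) (m + 1) 0 (by omega)]
    have hpre2 : PySem.List.pyGetD ((List.range (u.length + 1)).map (pvP cnt u)) (pvL u k (m + 1)) 0
        = pvP cnt u (pvL u k (m + 1)).toNat := by
      rw [PySem.List.pyGetD_of_nonneg _ 0 hlo_nonneg,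
        PySem.List.getD_map_range (pvP cnt u) (u.length + 1) (pvL u k (m + 1)).toNat 0 (by omega)]
    rw [hpre1, hpre2]
    simp only [pvM, pvS]

lemma countA_eq_counter (c : List Int) :
    c.foldl (fun d i => if d.contains i then d.modify i 0 (· + 1) else d.insert i 1)
      PySem.Dict.empty = PySem.Dict.counter c := by
  rw [PySem.Dict.counter_eq_foldl]
  congr 1
  funext d i
  by_cases h : d.contains i
  · simp [PySem.Dict.modify, h]
  · simp only [h, Bool.false_eq_true, if_false, PySem.Dict.modify]
    rw [PySem.Dict.getD_of_not_contains _ _ (by simpa using h)]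
    norm_num

lemma sorted_keys_strict (c : List Int) :
    (PySem.List.sorted (PySem.Dict.counter c).keys (fun x => x)).Pairwise (· < ·) := by
  have h1 := PySem.List.sorted_pairwise (PySem.Dict.counter c).keys (fun x => x)
  have h2 : (PySem.List.sorted (PySem.Dict.counter c).keys (fun x => x) (false)).Nodup := by
    have hp := PySem.List.sorted_perm (PySem.Dict.counter c).keys (fun x => x) false
    exact hp.nodup_iff.mpr (PySem.Dict.nodup_keys_counter c)
  exact (h1.and h2).imp (fun ⟨hle, hne⟩ => lt_of_le_of_ne hle hne)

-- ===== VERDICT (by name: the statement is the Claim_ definition above) =====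
theorem takecards_spec : Claim_equal_takecards := by
  intro n k c _ hpre
  show takecards n k c = takecards_alt n k c
  by_cases hc0 : c = []
  · subst hc0
    simp [takecards, takecards_alt]
  · have hk : 0 ≤ k := hpre.resolve_right hc0
    simp only [takecards, takecards_alt, countA_eq_counter,
      PySem.Dict.foldl_insert_getD_add_one_eq_counter, buildPre_eq]
    by_cases hk0 : k ≤ 0
    · have hkz : k = 0 := le_antisymm hk0 hk
      subst hkz
      rw [if_pos le_rfl, A_loop _ _ _ le_rfl]
      simp [pvM_zero_k]
    · have hk1 : 1 ≤ k := by omega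
      rw [if_neg hk0, A_loop _ _ _ hk,
        B_loop _ _ _ hk1 (sorted_keys_strict c) _ le_rfl]
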